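-- pv_equiv track=rewrite | github.com/pierreAntoineDel/ProjetFinM1 | Code/dataManagement.py | transformer_matrice2
-- ===== SOURCE A (Python) =====
-- def transformer_matrice2(matrice):
--     nouvelle_matrice = []
--     sous_matrice = []
--     for i, ligne in enumerate(matrice):
--         sous_matrice.append(ligne)
--         if (i + 1) % 2 == 0:
--             nouvelle_matrice.append(sous_matrice)
--             sous_matrice = []
--     return nouvelle_matrice
-- ===== SOURCE B (Python) =====
-- def transformer_matrice2(matrice):
--     it = iter(matrice)
--     return [[a, b] for a, b in zip(it, it)]
-- ===== Notes on version B (the rewrite author's own statement) =====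
-- stated objective: idiomatic
-- what changed: Replaces the index-parity accumulator loop by the idiomatic zip(it, it) pairing, consuming the rows two at a time with no counter or intermediate sublist state.
import Mathlib
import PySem

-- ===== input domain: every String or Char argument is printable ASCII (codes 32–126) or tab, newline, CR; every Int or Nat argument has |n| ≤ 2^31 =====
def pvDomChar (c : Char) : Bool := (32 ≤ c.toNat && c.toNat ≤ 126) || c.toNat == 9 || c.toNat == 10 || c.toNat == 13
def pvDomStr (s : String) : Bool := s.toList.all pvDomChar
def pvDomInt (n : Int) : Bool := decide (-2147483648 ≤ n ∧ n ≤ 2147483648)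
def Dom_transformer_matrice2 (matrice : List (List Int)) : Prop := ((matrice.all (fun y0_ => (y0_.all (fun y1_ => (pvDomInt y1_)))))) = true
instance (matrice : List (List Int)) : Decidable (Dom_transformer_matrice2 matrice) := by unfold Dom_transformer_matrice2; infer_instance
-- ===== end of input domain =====

-- B replaces A's index-parity accumulator loop by the idiomatic pair-consuming zip(it, it) (two-at-a-time recursion); same result, same cost.


-- ===== PORT A =====
-- loop body of A: append the row to sous_matrice; flush it when (i+1) % 2 == 0
def transformer_matrice2_step (st : List (List (List Int)) × List (List Int))
    (iv : Int × List Int) : List (List (List Int)) × List (List Int) :=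
  let sous_matrice := st.2 ++ [iv.2]
  if PySem.Int.mod (iv.1 + 1) 2 == 0 then (st.1 ++ [sous_matrice], [])
  else (st.1, sous_matrice)

def transformer_matrice2 (matrice : List (List Int)) : List (List (List Int)) :=
  ((PySem.List.enumerate matrice 0).foldl transformer_matrice2_step ([], [])).1

-- ===== PORT B =====
-- zip(it, it) over a single iterator consumes the rows two at a time; a trailing unpaired row is dropped
def transformer_matrice2_alt : List (List Int) → List (List (List Int))
  | a :: b :: rest => [a, b] :: transformer_matrice2_alt rest
  | _ => []

-- ===== PRECONDITION & SPEC =====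
def Spec_transformer_matrice2 (matrice : List (List Int)) (out : List (List (List Int))) : Prop := out = transformer_matrice2_alt matrice
instance (matrice : List (List Int)) (out : List (List (List Int))) : Decidable (Spec_transformer_matrice2 matrice out) := by unfold Spec_transformer_matrice2; infer_instance

-- ===== CLAIM (what is proved, stated in full; the proofs are below) =====
def Claim_equal_transformer_matrice2 : Prop := ∀ (matrice : List (List Int)), Dom_transformer_matrice2 matrice → Spec_transformer_matrice2 matrice (transformer_matrice2 matrice)

-- ===== LEMMAS AND PROOFS =====
-- Invariant of A's loop: started at an even index with an empty sous_matrice, the loop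
-- flushes the rows in pairs, appending exactly B's pairing after the accumulator.
theorem transformer_matrice2_loop (m : List (List Int)) :
    ∀ (i : Int) (nm : List (List (List Int))), i % 2 = 0 →
      ((PySem.List.enumerate m i).foldl transformer_matrice2_step (nm, [])).1
        = nm ++ transformer_matrice2_alt m := by
  induction m using transformer_matrice2_alt.induct with
  | case1 a b rest ih =>
    intro i nm hi
    have h1 : (i + 1).fmod 2 ≠ 0 := by rw [Int.fmod_eq_emod]; omega
    have h2 : (i + 1 + 1).fmod 2 = 0 := by rw [Int.fmod_eq_emod]; omega
    have hstep : transformer_matrice2_step (transformer_matrice2_step (nm, []) (i, a)) (i + 1, b)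
        = (nm ++ [[a, b]], []) := by
      simp [transformer_matrice2_step, PySem.Int.mod, h1, h2]
    simp only [PySem.List.enumerate_cons, List.foldl_cons, hstep]
    rw [ih (i + 1 + 1) (nm ++ [[a, b]]) (by omega)]
    simp [transformer_matrice2_alt]
  | case2 m h =>
    intro i nm hi
    match m, h with
    | [], _ =>
      simp [PySem.List.enumerate_nil, transformer_matrice2_alt]
    | [a], _ =>
      have h1 : (i + 1).fmod 2 ≠ 0 := by rw [Int.fmod_eq_emod]; omega
      simp [PySem.List.enumerate_cons, PySem.List.enumerate_nil,
        transformer_matrice2_step, PySem.Int.mod, h1, transformer_matrice2_alt]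
    | a :: b :: rest, h => exact absurd rfl (h a b rest)

-- ===== VERDICT (by name: the statement is the Claim_ definition above) =====
theorem transformer_matrice2_spec : Claim_equal_transformer_matrice2 := by
  intro m _
  unfold Spec_transformer_matrice2 transformer_matrice2
  simpa using transformer_matrice2_loop m 0 [] (by omega)
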